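-- pv_equiv track=rewrite | github.com/UW-Madison-Lee-Lab/ENTP | rasp/count3.py | count3_true
-- ===== SOURCE A (Python) =====
-- def count3_true(x):
--     n = len(x)
--     m = n + 1
--     count = 0
--     for i in range(n):
--         for j in range(n):
--             if (x[i] + x[j] + x[-1]) % m == 0:
--                 count += 1
--
--     return [count % m] * n
-- ===== SOURCE B (Python) =====
-- def count3_true(x):
--     n = len(x)
--     if n == 0:
--         return []
--     m = n + 1
--     last = x[-1]
--     freq = {}
--     for v in x:
--         r = v % m
--         freq[r] = freq.get(r, 0) + 1
--     count = 0
--     for v in x: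
--         count += freq.get((-last - v) % m, 0)
--     return [count % m] * n
-- ===== Notes on version B (the rewrite author's own statement) =====
-- stated objective: faster
-- what changed: Replaced the O(n^2) double loop over index pairs by a residue-frequency dictionary built in one pass, so each i contributes freq[(-last-x[i]) % m] matching j's in O(1).
import Mathlib
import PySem

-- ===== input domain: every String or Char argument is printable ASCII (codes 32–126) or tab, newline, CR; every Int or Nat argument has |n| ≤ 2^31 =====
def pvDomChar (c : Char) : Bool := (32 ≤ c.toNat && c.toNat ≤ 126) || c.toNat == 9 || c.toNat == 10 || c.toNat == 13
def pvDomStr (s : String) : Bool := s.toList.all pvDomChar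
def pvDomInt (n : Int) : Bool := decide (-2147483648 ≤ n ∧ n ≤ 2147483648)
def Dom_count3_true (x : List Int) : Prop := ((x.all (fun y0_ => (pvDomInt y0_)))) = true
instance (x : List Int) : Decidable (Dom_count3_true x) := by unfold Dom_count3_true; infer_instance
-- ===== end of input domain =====

-- B replaces A's O(n^2) double loop by a one-pass residue-frequency dictionary (objective: faster).

-- ===== PORT A =====
-- indices i, j range over 0..n-1 and -1 is used only when the loop runs (n > 0), so
-- pyGetD is exact here (the IndexError branch is unreachable)
def count3_true (x : List Int) : List Int :=
  let n : Int := x.length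
  let m : Int := n + 1
  let count : Int :=
    (PySem.List.pyRange 0 n 1).foldl (fun c i =>
      (PySem.List.pyRange 0 n 1).foldl (fun c j =>
        if PySem.Int.mod (PySem.List.pyGetD x i 0 + PySem.List.pyGetD x j 0 + PySem.List.pyGetD x (-1) 0) m = 0
        then c + 1 else c) c) 0
  List.replicate x.length (PySem.Int.mod count m)

-- ===== PORT B =====
def count3_true_alt (x : List Int) : List Int :=
  let n : Int := x.length
  if x.length = 0 then []
  else
    let m : Int := n + 1
    let last : Int := PySem.List.pyGetD x (-1) 0
    let freq : PySem.Dict Int Int :=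
      x.foldl (fun d v => d.insert (PySem.Int.mod v m) (d.getD (PySem.Int.mod v m) 0 + 1)) PySem.Dict.empty
    let count : Int := x.foldl (fun c v => c + freq.getD (PySem.Int.mod (-last - v) m) 0) 0
    List.replicate x.length (PySem.Int.mod count m)

-- ===== PRECONDITION & SPEC =====
def Spec_count3_true (x : List Int) (out : List Int) : Prop := out = count3_true_alt x
instance (x : List Int) (out : List Int) : Decidable (Spec_count3_true x out) := by unfold Spec_count3_true; infer_instance

-- ===== CLAIM (what is proved, stated in full; the proofs are below) =====
def Claim_equal_count3_true : Prop := ∀ (x : List Int), Dom_count3_true x → Spec_count3_true x (count3_true x)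

-- ===== LEMMAS AND PROOFS =====

-- the congruence core: membership of a pair in A's test ↔ residue match used by B
theorem pv_mod_iff (m a w last : Int) (hm : 0 < m) :
    (PySem.Int.mod (a + w + last) m = 0) ↔ (PySem.Int.mod w m = PySem.Int.mod (-last - a) m) := by
  simp only [PySem.Int.mod_eq_emod_of_pos hm]
  rw [Int.emod_eq_emod_iff_emod_sub_eq_zero]
  constructor <;> intro h
  · have : w - (-last - a) = a + w + last := by ring
    rw [this]; exact h
  · have : a + w + last = w - (-last - a) := by ring
    rw [this]; exact h

-- ===== VERDICT (by name: the statement is the Claim_ definition above) =====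
theorem count3_true_spec : Claim_equal_count3_true := by
  intro x _
  unfold Spec_count3_true count3_true count3_true_alt
  by_cases hx : x.length = 0
  · rcases List.length_eq_zero_iff.mp hx with rfl
    simp [PySem.List.pyRange_one_eq_nil]
  · simp only [hx, if_false]
    congr 1
    congr 1
    have hmpos : (0:Int) < (x.length:Int) + 1 := by positivity
    -- A's double index loop = sum over elements of a residue count
    rw [PySem.List.foldl_pyRange_zero_pyGetD' x 0
      (fun c v => (PySem.List.pyRange 0 (x.length:Int) 1).foldl
        (fun c j => if PySem.Int.mod (v + PySem.List.pyGetD x j 0 + PySem.List.pyGetD x (-1) 0) ((x.length:Int)+1) = 0 then c + 1 else c) c) 0]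
    have hinner : ∀ (a c : Int),
        (PySem.List.pyRange 0 (x.length:Int) 1).foldl
          (fun c j => if PySem.Int.mod (a + PySem.List.pyGetD x j 0 + PySem.List.pyGetD x (-1) 0) ((x.length:Int)+1) = 0 then c + 1 else c) c
        = c + (x.countP (fun w => decide (PySem.Int.mod (a + w + PySem.List.pyGetD x (-1) 0) ((x.length:Int)+1) = 0)) : Int) := by
      intro a c
      rw [PySem.List.foldl_pyRange_zero_pyGetD' x 0
        (fun c w => if PySem.Int.mod (a + w + PySem.List.pyGetD x (-1) 0) ((x.length:Int)+1) = 0 then c + 1 else c) c]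
      exact PySem.List.foldl_ite_add_one _ _ _
    have houter :
        List.foldl (fun c v => (PySem.List.pyRange 0 (x.length:Int) 1).foldl
            (fun c j => if PySem.Int.mod (v + PySem.List.pyGetD x j 0 + PySem.List.pyGetD x (-1) 0) ((x.length:Int)+1) = 0 then c + 1 else c) c) 0 x
      = List.foldl (fun c v => c + (x.countP (fun w => decide (PySem.Int.mod (v + w + PySem.List.pyGetD x (-1) 0) ((x.length:Int)+1) = 0)) : Int)) 0 x :=
      PySem.List.foldl_congr_mem x _ _ 0 (fun acc a _ => hinner a acc)
    rw [houter, PySem.List.foldl_add]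
    -- B's frequency dictionary is Counter of the residues
    have hfreq : (x.foldl (fun d v => d.insert (PySem.Int.mod v ((x.length:Int)+1)) (d.getD (PySem.Int.mod v ((x.length:Int)+1)) 0 + 1)) PySem.Dict.empty)
        = PySem.Dict.counter (x.map (fun v => PySem.Int.mod v ((x.length:Int)+1))) := by
      rw [← PySem.Dict.foldl_insert_getD_add_one_eq_counter, List.foldl_map]
    rw [hfreq, PySem.List.foldl_add]
    rw [zero_add, zero_add]
    refine congrArg (List.sum (α := Int)) (List.map_congr_left ?_)
    intro a _
    rw [PySem.Dict.getD_counter]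
    have hc : (x.map (fun v => PySem.Int.mod v ((x.length:Int)+1))).count (PySem.Int.mod (-PySem.List.pyGetD x (-1) 0 - a) ((x.length:Int)+1))
        = x.countP (fun w => PySem.Int.mod w ((x.length:Int)+1) == PySem.Int.mod (-PySem.List.pyGetD x (-1) 0 - a) ((x.length:Int)+1)) := by
      simp [List.count, List.countP_map, Function.comp_def]
    rw [hc]
    congr 1
    apply List.countP_congr
    intro w _
    simp only [decide_eq_true_iff, beq_iff_eq]
    exact pv_mod_iff _ a w _ hmpos
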